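-- pv_equiv track=rewrite | github.com/MathiasJon/Python-Archicad-Library-Scripts | 01_BASIC_data_retrieval/150_tapir/159_get_element_subelements.py | count_subelements
-- ===== SOURCE A (Python) =====
-- def count_subelements(subelements):
--     """
--     Count total number of subelements across all types.
--
--     Args:
--         subelements: Dictionary with subelement types
--
--     Returns:
--         Total count and breakdown by type
--     """
--     if not subelements:
--         return 0, {}
--
--     counts = {}
--     total = 0
--
--     # Define all possible subelement types from API docs
--     subelement_types = [
--         'cWallSegments', 'cWallFrames', 'cWallPanels', 'cWallJunctions', 'cWallAccessories',
--         'stairRisers', 'stairTreads', 'stairStructures',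
--         'railingNodes', 'railingSegments', 'railingPosts', 'railingRailEnds',
--         'railingRailConnections', 'railingHandrailEnds', 'railingHandrailConnections',
--         'railingToprailEnds', 'railingToprailConnections', 'railingRails',
--         'railingToprails', 'railingHandrails', 'railingPatterns', 'railingInnerPosts',
--         'railingPanels', 'railingBalusterSets', 'railingBalusters',
--         'beamSegments', 'columnSegments'
--     ]
--
--     for sub_type in subelement_types:
--         if isinstance(subelements, dict):
--             elements = subelements.get(sub_type, [])
--         else:
--             elements = getattr(subelements, sub_type, []) if hasattr(
--                 subelements, sub_type) else []
--
--         if elements: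
--             count = len(elements) if isinstance(elements, list) else 0
--             if count > 0:
--                 counts[sub_type] = count
--                 total += count
--
--     return total, counts
-- ===== SOURCE B (Python) =====
-- _KNOWN_TYPES = (
--     'cWallSegments', 'cWallFrames', 'cWallPanels', 'cWallJunctions', 'cWallAccessories',
--     'stairRisers', 'stairTreads', 'stairStructures',
--     'railingNodes', 'railingSegments', 'railingPosts', 'railingRailEnds',
--     'railingRailConnections', 'railingHandrailEnds', 'railingHandrailConnections',
--     'railingToprailEnds', 'railingToprailConnections', 'railingRails',
--     'railingToprails', 'railingHandrails', 'railingPatterns', 'railingInnerPosts',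
--     'railingPanels', 'railingBalusterSets', 'railingBalusters',
--     'beamSegments', 'columnSegments')
-- _RANK = {t: i for i, t in enumerate(_KNOWN_TYPES)}
--
--
-- def count_subelements(subelements):
--     """Collect the known, nonempty-list entries in one scan of the input, then
--     sort them by precomputed canonical rank and emit (sort-then-emit)."""
--     if not subelements:
--         return 0, {}
--     picked = sorted(((k, len(v)) for k, v in subelements.items()
--                      if k in _RANK and isinstance(v, list) and v),
--                     key=lambda kv: _RANK[kv[0]])
--     return sum(n for _, n in picked), dict(picked)
-- ===== Notes on version B (the rewrite author's own statement) =====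
-- stated objective: alternative
-- what changed: B makes one scan of the actual input collecting (key, len) pairs for known nonempty-list entries, then sorts that small list by a precomputed rank table and emits dict(picked) and its sum, instead of A's accumulation loop that probes each of the 27 fixed keys against the dict and maintains counts/total per probe.
import Mathlib
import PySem

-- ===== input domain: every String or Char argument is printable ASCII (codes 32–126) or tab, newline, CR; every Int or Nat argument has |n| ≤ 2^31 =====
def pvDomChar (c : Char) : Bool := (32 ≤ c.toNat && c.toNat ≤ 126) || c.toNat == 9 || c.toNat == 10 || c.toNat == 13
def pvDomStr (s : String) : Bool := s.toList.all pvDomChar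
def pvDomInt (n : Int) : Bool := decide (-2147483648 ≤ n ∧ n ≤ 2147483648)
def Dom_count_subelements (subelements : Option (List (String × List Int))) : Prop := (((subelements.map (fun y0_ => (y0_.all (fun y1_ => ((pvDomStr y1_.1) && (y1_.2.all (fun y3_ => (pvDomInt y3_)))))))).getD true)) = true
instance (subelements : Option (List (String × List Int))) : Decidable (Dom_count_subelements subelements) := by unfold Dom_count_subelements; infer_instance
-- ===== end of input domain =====

-- B collects the known nonempty entries in one scan of the input, sorts them by a precomputed
-- canonical rank table and emits the sorted list; alternative algorithm (sort-then-emit), same cost.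


set_option maxRecDepth 40000

-- ===== PORT A =====
-- the fixed list of subelement types from A
def pvSubTypes : List String :=
  ["cWallSegments", "cWallFrames", "cWallPanels", "cWallJunctions", "cWallAccessories",
   "stairRisers", "stairTreads", "stairStructures",
   "railingNodes", "railingSegments", "railingPosts", "railingRailEnds",
   "railingRailConnections", "railingHandrailEnds", "railingHandrailConnections",
   "railingToprailEnds", "railingToprailConnections", "railingRails",
   "railingToprails", "railingHandrails", "railingPatterns", "railingInnerPosts",
   "railingPanels", "railingBalusterSets", "railingBalusters",
   "beamSegments", "columnSegments"]

-- A: probe every known type against the dict; the non-dict getattr branch is unreachable for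
-- the Option-dict input type, and isinstance(elements, list) is always true here.
def count_subelements (subelements : Option (List (String × List Int))) : Int × (List (String × Int)) :=
  match subelements with
  | none => (0, [])
  | some d =>
    if d = [] then (0, [])          -- `if not subelements`
    else
      let st := pvSubTypes.foldl
        (fun (acc : PySem.Dict String Int × Int) subType =>
          let elements := (PySem.Dict.mk d).getD subType []
          if elements ≠ [] then
            let count : Int := elements.length
            if count > 0 then (acc.1.insert subType count, acc.2 + count) else acc
          else acc)
        (PySem.Dict.mk [], 0)
      (st.2, st.1.items)

-- ===== PORT B =====
-- _RANK = {t: i for i, t in enumerate(_KNOWN_TYPES)}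
def pvRank : PySem.Dict String Int :=
  (PySem.List.enumerate pvSubTypes).foldl (fun d p => d.insert p.2 p.1) PySem.Dict.empty

-- B (dict branch; the object/getattr branch is unreachable for the Option-dict input type):
-- one scan of the input collecting (k, len(v)) for known nonempty entries, sorted by rank.
def count_subelements_alt (subelements : Option (List (String × List Int))) : Int × (List (String × Int)) :=
  match subelements with
  | none => (0, [])
  | some d =>
    if d = [] then (0, [])
    else
      -- picked = sorted(((k, len(v)) for k, v in items if k in _RANK and isinstance(v, list) and v),
      --                 key=lambda kv: _RANK[kv[0]])
      -- the key lookup _RANK[kv[0]] is ported as getD _ 0: every picked key is in _RANK, so the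
      -- default is never used (no KeyError is reachable)
      let picked : List (String × Int) :=
        PySem.List.sorted
          (d.filterMap (fun kv =>
            if pvRank.contains kv.1 && !kv.2.isEmpty then some (kv.1, (kv.2.length : Int)) else none))
          (fun p => pvRank.getD p.1 0)
      ((picked.map (·.2)).sum, (PySem.Dict.ofList picked).items)

-- ===== PRECONDITION & SPEC =====
-- Pre_ excludes association lists with duplicate keys: the Python argument is a dict, which cannot
-- hold a key twice, so no Python input is excluded; on duplicate-key lists A reads the first binding
-- while B scans every binding, an artefact of the association-list encoding.
def Pre_count_subelements (subelements : Option (List (String × List Int))) : Prop :=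
  ((subelements.getD []).map Prod.fst).Nodup
instance (subelements : Option (List (String × List Int))) : Decidable (Pre_count_subelements subelements) := by
  unfold Pre_count_subelements; infer_instance

def pvWitness_count_subelements : (Option (List (String × List Int))) :=
  some [("stairRisers", [1, 2]), ("foo", [3]), ("railingRails", [])]

def Spec_count_subelements (subelements : Option (List (String × List Int))) (out : Int × (List (String × Int))) : Prop := out = count_subelements_alt subelements
instance (subelements : Option (List (String × List Int))) (out : Int × (List (String × Int))) : Decidable (Spec_count_subelements subelements out) := by unfold Spec_count_subelements; infer_instance

-- ===== CLAIM (what is proved, stated in full; the proofs are below) =====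
def Claim_equal_count_subelements : Prop := ∀ (subelements : Option (List (String × List Int))), Dom_count_subelements subelements → Pre_count_subelements subelements → Spec_count_subelements subelements (count_subelements subelements)

-- ===== LEMMAS AND PROOFS =====

-- what A keeps for a probed type t: Some (t, len) iff the dict binds t to a nonempty list
def pvF (d : List (String × List Int)) (t : String) : Option (String × Int) :=
  match (PySem.Dict.mk d).get? t with
  | some v => if v.isEmpty then none else some (t, (v.length : Int))
  | none => none

-- the body of B's comprehension filter
def pvG (kv : String × List Int) : Option (String × Int) :=
  if pvRank.contains kv.1 && !kv.2.isEmpty then some (kv.1, (kv.2.length : Int)) else none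

-- the body of A's loop over the types
def pvStepA (d : List (String × List Int)) (acc : PySem.Dict String Int × Int) (subType : String) :
    PySem.Dict String Int × Int :=
  let elements := (PySem.Dict.mk d).getD subType []
  if elements ≠ [] then
    let count : Int := elements.length
    if count > 0 then (acc.1.insert subType count, acc.2 + count) else acc
  else acc

lemma rank_keys : pvRank.keys = pvSubTypes := by decide

lemma rank_pairwise : pvSubTypes.Pairwise (fun a b => pvRank.getD a 0 < pvRank.getD b 0) := by decide

lemma subTypes_nodup : pvSubTypes.Nodup := by decide

-- A's accumulation loop, characterised: it appends exactly the kept pairs and adds their lengths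
lemma A_fold (d : List (String × List Int)) (ts : List String) (hts : ts.Nodup)
    (acc : PySem.Dict String Int) (tot : Int)
    (hfresh : ∀ t ∈ ts, acc.contains t = false) :
    ts.foldl (pvStepA d) (acc, tot) =
      (PySem.Dict.mk (acc.items ++ ts.filterMap (pvF d)),
       tot + ((ts.filterMap (pvF d)).map (·.2)).sum) := by
  induction ts generalizing acc tot with
  | nil =>
    simp only [List.filterMap_nil, List.append_nil, List.foldl_nil, List.map_nil, List.sum_nil,
      Int.add_zero]
  | cons t rest ih =>
    have htr : t ∉ rest := (List.nodup_cons.mp hts).1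
    simp only [List.foldl_cons, List.filterMap_cons]
    cases hg : (PySem.Dict.mk d).get? t with
    | none =>
      have hstep : pvStepA d (acc, tot) t = (acc, tot) := by
        simp [pvStepA, PySem.Dict.getD_eq_get?_getD, hg]
      have hf : pvF d t = none := by simp [pvF, hg]
      rw [hstep, hf, ih (List.nodup_cons.mp hts).2 acc tot
        (fun x hx => hfresh x (List.mem_cons_of_mem _ hx))]
    | some v =>
      by_cases hv : v = []
      · subst hv
        have hstep : pvStepA d (acc, tot) t = (acc, tot) := by
          simp [pvStepA, PySem.Dict.getD_eq_get?_getD, hg]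
        have hf : pvF d t = none := by simp [pvF, hg]
        rw [hstep, hf, ih (List.nodup_cons.mp hts).2 acc tot
          (fun x hx => hfresh x (List.mem_cons_of_mem _ hx))]
      · have hlen : (0 : Int) < (v.length : Int) := by
          have : v.length ≠ 0 := fun h0 => hv (List.eq_nil_of_length_eq_zero h0)
          omega
        have hstep : pvStepA d (acc, tot) t = (acc.insert t (v.length : Int), tot + (v.length : Int)) := by
          simp only [pvStepA, PySem.Dict.getD_eq_get?_getD, hg, Option.getD_some]
          simp [hv]
        have hf : pvF d t = some (t, (v.length : Int)) := by simp [pvF, hg, hv]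
        have haccT : acc.contains t = false := hfresh t List.mem_cons_self
        rw [hstep, hf, ih (List.nodup_cons.mp hts).2 (acc.insert t (v.length : Int))
          (tot + (v.length : Int)) ?fr]
        case fr =>
          intro x hx
          rw [PySem.Dict.contains_insert]
          have hne : x ≠ t := fun he => htr (he ▸ hx)
          simp [hne, hfresh x (List.mem_cons_of_mem _ hx)]
        rw [PySem.Dict.items_insert_of_not_contains _ _ haccT]
        simp only [List.append_assoc, List.singleton_append, List.map_cons, List.sum_cons]
        rw [Prod.mk.injEq]
        exact ⟨rfl, by ring⟩

-- B's sorted pick = A's kept pairs in type order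
lemma sorted_picked (d : List (String × List Int)) (hnd : (d.map Prod.fst).Nodup) :
    PySem.List.sorted (d.filterMap pvG) (fun p => pvRank.getD p.1 0) = pvSubTypes.filterMap (pvF d) := by
  have hkeysnd : (PySem.Dict.mk d).keys.Nodup := hnd
  have hF : ∀ t p, pvF d t = some p →
      ∃ v, (PySem.Dict.mk d).get? t = some v ∧ v ≠ [] ∧ p = (t, (v.length : Int)) := by
    intro t p h
    unfold pvF at h
    cases hg : (PySem.Dict.mk d).get? t with
    | none => rw [hg] at h; cases h
    | some v =>
      rw [hg] at h
      by_cases hv : v.isEmpty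
      · simp [hv] at h
      · refine ⟨v, rfl, by simpa using hv, ?_⟩
        simp only [hv] at h
        simp at h
        exact h.symm
  have hG : ∀ (kv : String × List Int) p, pvG kv = some p →
      kv.1 ∈ pvSubTypes ∧ kv.2 ≠ [] ∧ p = (kv.1, (kv.2.length : Int)) := by
    intro kv p h
    unfold pvG at h
    by_cases hc : (pvRank.contains kv.1 && !kv.2.isEmpty) = true
    · obtain ⟨hc1, hc2⟩ := Bool.and_eq_true_iff.mp hc
      have hmem : kv.1 ∈ pvSubTypes := by
        have := (PySem.Dict.contains_iff_mem_keys pvRank kv.1).mp hc1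
        rwa [rank_keys] at this
      have hne : kv.2 ≠ [] := by simpa using hc2
      simp only [hc, if_true] at h
      exact ⟨hmem, hne, (Option.some.injEq _ _ ▸ h).symm⟩
    · simp [hc] at h
  have hPairA : (pvSubTypes.filterMap (pvF d)).Pairwise (fun p q => p.1 ≠ q.1) :=
    List.pairwise_filterMap.mpr (subTypes_nodup.imp (by
      intro a b hab p hp q hq
      obtain ⟨v, _, _, rfl⟩ := hF a p hp
      obtain ⟨w, _, _, rfl⟩ := hF b q hq
      simpa using hab))
  have hPairB : (d.filterMap pvG).Pairwise (fun p q => p.1 ≠ q.1) :=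
    List.pairwise_filterMap.mpr ((List.pairwise_map.mp hnd).imp (by
      intro a b hab p hp q hq
      obtain ⟨_, _, rfl⟩ := hG a p hp
      obtain ⟨_, _, rfl⟩ := hG b q hq
      simpa using hab))
  have hndA : (pvSubTypes.filterMap (pvF d)).Nodup :=
    hPairA.imp (fun h heq => h (congrArg Prod.fst heq))
  have hndB : (d.filterMap pvG).Nodup :=
    hPairB.imp (fun h heq => h (congrArg Prod.fst heq))
  apply PySem.List.sorted_eq_of_perm_of_pairwise_lt
  · rw [List.perm_ext_iff_of_nodup hndA hndB]
    intro p
    simp only [List.mem_filterMap]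
    constructor
    · rintro ⟨t, ht, hft⟩
      obtain ⟨v, hget, hv, rfl⟩ := hF t _ hft
      refine ⟨(t, v), ?_, ?_⟩
      · exact (PySem.Dict.get?_eq_some_iff_mem_items _ _ _ hkeysnd).mp hget
      · have hcont : pvRank.contains t = true := by
          rw [PySem.Dict.contains_iff_mem_keys, rank_keys]; exact ht
        simp [pvG, hcont, hv]
    · rintro ⟨kv, hkv, hgkv⟩
      obtain ⟨hmem, hne, rfl⟩ := hG kv _ hgkv
      refine ⟨kv.1, hmem, ?_⟩
      have hget : (PySem.Dict.mk d).get? kv.1 = some kv.2 :=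
        (PySem.Dict.get?_eq_some_iff_mem_items _ _ _ hkeysnd).mpr hkv
      simp [pvF, hget, hne]
  · exact List.pairwise_filterMap.mpr (rank_pairwise.imp (by
      intro a b hab p hp q hq
      obtain ⟨v, _, _, rfl⟩ := hF a p hp
      obtain ⟨w, _, _, rfl⟩ := hF b q hq
      simpa using hab))

lemma pvF_fst (d : List (String × List Int)) (t : String) (p : String × Int)
    (h : pvF d t = some p) : p.1 = t := by
  unfold pvF at h
  cases hg : (PySem.Dict.mk d).get? t with
  | none => rw [hg] at h; cases h
  | some v =>
    rw [hg] at h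
    by_cases hv : v.isEmpty
    · simp [hv] at h
    · simp only [hv] at h
      simp at h
      rw [← h]

-- the picked list has distinct keys
lemma picked_fst_nodup (d : List (String × List Int)) :
    ((pvSubTypes.filterMap (pvF d)).map Prod.fst).Nodup :=
  List.pairwise_map.mpr (List.pairwise_filterMap.mpr (subTypes_nodup.imp (by
    intro a b hab p hp q hq
    rw [pvF_fst _ _ _ hp, pvF_fst _ _ _ hq]
    exact hab)))

-- dict(picked) for distinct keys is just the list
lemma ofList_items (L : List (String × Int)) (h : (L.map Prod.fst).Nodup) :
    (PySem.Dict.ofList L).items = L := by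
  have := PySem.Dict.items_foldl_insert_fresh L Prod.fst Prod.snd (PySem.Dict.empty (κ := String) (ν := Int))
    (fun a _ => by simp [PySem.Dict.contains_empty]) h
  simpa [PySem.Dict.ofList, PySem.Dict.update, PySem.Dict.empty] using this

-- ===== VERDICT (by name: the statement is the Claim_ definition above) =====
theorem count_subelements_spec : Claim_equal_count_subelements := by
  intro s _ hpre
  unfold Spec_count_subelements
  match s with
  | none => rfl
  | some d =>
    by_cases h : d = []
    · subst h; rfl
    · have hnd : (d.map Prod.fst).Nodup := hpre
      have pA : count_subelements (some d) =
          ((pvSubTypes.foldl (pvStepA d) (PySem.Dict.mk [], 0)).2,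
           (pvSubTypes.foldl (pvStepA d) (PySem.Dict.mk [], 0)).1.items) := by
        simp only [count_subelements, if_neg h]
        rfl
      have pB : count_subelements_alt (some d) =
          (((PySem.List.sorted (d.filterMap pvG) (fun p => pvRank.getD p.1 0)).map (·.2)).sum,
           (PySem.Dict.ofList
             (PySem.List.sorted (d.filterMap pvG) (fun p => pvRank.getD p.1 0))).items) := by
        simp only [count_subelements_alt, if_neg h]
        rfl
      rw [pA, pB, sorted_picked d hnd,
        A_fold d pvSubTypes subTypes_nodup (PySem.Dict.mk []) 0
          (fun t _ => by simp [PySem.Dict.contains]),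
        ofList_items _ (picked_fst_nodup d)]
      simp
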